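-- pv_equiv track=rewrite | github.com/g2hsec/bundleInspector | src/bundleInspector/correlator/graph.py | _collect_initiator_ancestor_chains_uncached
-- ===== SOURCE A (Python) =====
-- def _collect_initiator_ancestor_chains_uncached(
--
--     file_url: str,
--     initiator_map: dict[str, set[str]],
--     max_depth: int = 5,
-- ) -> list[list[str]]:
--     """Collect direct and transitive initiator chains for a target file."""
--     chains: list[list[str]] = []
--     queue: list[tuple[str, list[str], set[str], int]] = [(file_url, [], {file_url}, 0)]
--
--     while queue:
--         current, ancestry, visited, depth = queue.pop(0)
--         if depth >= max_depth:
--             continue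
--         initiators = sorted(initiator_map.get(current, set()))
--         for initiator in initiators:
--             if initiator in visited:
--                 continue
--             next_ancestry = [initiator, *ancestry]
--             chains.append(next_ancestry)
--             queue.append((initiator, next_ancestry, {initiator, *visited}, depth + 1))
--
--     chains.sort(key=len, reverse=True)
--     return chains
-- ===== SOURCE B (Python) =====
-- def _collect_initiator_ancestor_chains_uncached(
--     file_url: str,
--     initiator_map: dict[str, set[str]],
--     max_depth: int = 5,
-- ) -> list[list[str]]:
--     """Collect direct and transitive initiator chains by recursive depth-first search."""
--     chains: list[list[str]] = []
--
--     def dfs(current: str, ancestry: list[str], visited: set[str], depth: int) -> None: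
--         if depth >= max_depth:
--             return
--         for initiator in sorted(initiator_map.get(current, set())):
--             if initiator in visited:
--                 continue
--             next_ancestry = [initiator, *ancestry]
--             chains.append(next_ancestry)
--             dfs(initiator, next_ancestry, {initiator, *visited}, depth + 1)
--
--     dfs(file_url, [], {file_url}, 0)
--     chains.sort(key=len, reverse=True)
--     return chains
-- ===== Notes on version B (the rewrite author's own statement) =====
-- stated objective: alternative
-- what changed: Replaced A's iterative BFS with an explicit FIFO queue of (node, ancestry, visited, depth) tuples by a recursive pre-order DFS helper that emits each chain as it descends; the traversal order (and hence the unsorted chains list) differs, but the final stable sort by length restores the identical output because within each length class both orders are the lexicographic order of the paths.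
import Mathlib
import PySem

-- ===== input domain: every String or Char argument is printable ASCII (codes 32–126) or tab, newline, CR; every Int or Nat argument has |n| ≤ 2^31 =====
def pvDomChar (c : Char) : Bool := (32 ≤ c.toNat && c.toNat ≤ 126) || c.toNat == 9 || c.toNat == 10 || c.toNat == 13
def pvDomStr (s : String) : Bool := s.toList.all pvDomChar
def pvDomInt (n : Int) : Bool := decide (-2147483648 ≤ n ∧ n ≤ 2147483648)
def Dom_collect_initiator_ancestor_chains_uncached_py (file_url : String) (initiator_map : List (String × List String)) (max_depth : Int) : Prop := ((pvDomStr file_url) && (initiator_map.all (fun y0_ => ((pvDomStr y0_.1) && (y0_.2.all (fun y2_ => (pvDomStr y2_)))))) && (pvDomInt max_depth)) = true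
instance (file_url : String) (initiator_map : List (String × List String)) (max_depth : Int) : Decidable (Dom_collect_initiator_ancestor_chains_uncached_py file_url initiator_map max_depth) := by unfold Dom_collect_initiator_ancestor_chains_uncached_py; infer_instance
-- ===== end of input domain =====

-- B replaces A's iterative BFS with an explicit FIFO queue by a recursive pre-order DFS;
-- the stable sort by length restores the identical output (objective: alternative, no speed claim).

-- ===== PORT A =====
-- helper lemmas/functions needed by the ports' termination measures (cited in decreasing_by)

-- a for-loop appending to two lists, skipping when the test holds (used by A's inner loop)
theorem pvFoldPair {α β γ : Type} (l : List α) (p : α → Bool) (f : α → β) (g : α → γ)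
    (a1 : List β) (a2 : List γ) :
    l.foldl (fun acc x => if p x then acc else (acc.1 ++ [f x], acc.2 ++ [g x])) (a1, a2)
      = (a1 ++ (l.filter (fun x => !p x)).map f, a2 ++ (l.filter (fun x => !p x)).map g) := by
  induction l generalizing a1 a2 with
  | nil => simp
  | cons x t ih =>
    by_cases h : p x = true <;> simp [h, ih, List.append_assoc]

-- total size of the map's value lists: bounds the number of children of any node
def pvS (m : PySem.Dict String (List String)) : Nat :=
  (m.items.map (fun p => p.2.length)).sum

theorem pvLenGetD (m : PySem.Dict String (List String)) (c : String) :
    (m.getD c []).length ≤ pvS m := by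
  obtain ⟨l⟩ := m
  induction l with
  | nil => simp [PySem.Dict.getD, PySem.Dict.get?, pvS]
  | cons p t ih =>
    rw [PySem.Dict.getD_eq_get?_getD, PySem.Dict.get?_mk_cons]
    by_cases h : p.1 == c
    · simp [h, pvS]
    · rw [PySem.Dict.getD_eq_get?_getD] at ih
      simp only [h, Bool.false_eq_true, ite_false]
      simp only [pvS, List.map_cons, List.sum_cons] at ih ⊢
      omega

-- queue measure for A's BFS loop: each entry weighs (pvS m + 1) ^ (remaining depth)
def pvQM (md : Int) (S : Nat) (q : List (String × List String × PySem.Set String × Int)) : Nat :=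
  (q.map (fun it => (S + 1) ^ ((md - it.2.2.2).toNat))).sum

-- A's inner for-loop over the sorted initiators: append a chain and a queue entry per new one
def pvExpandA (visited : PySem.Set String) (ancestry : List String) (depth : Int)
    (initiators : List String) :
    List (List String) × List (String × List String × PySem.Set String × Int) :=
  initiators.foldl
    (fun acc initiator =>
      if PySem.Set.contains visited initiator then acc
      else (acc.1 ++ [initiator :: ancestry],
            acc.2 ++ [(initiator, initiator :: ancestry,
                       PySem.Set.update (PySem.Set.ofList [initiator]) visited, depth + 1)]))
    ([], [])

theorem pvExpandA_eq (visited : PySem.Set String) (ancestry : List String) (depth : Int)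
    (initiators : List String) :
    pvExpandA visited ancestry depth initiators
      = ((initiators.filter (fun i => !PySem.Set.contains visited i)).map (· :: ancestry),
         (initiators.filter (fun i => !PySem.Set.contains visited i)).map
           (fun i => (i, i :: ancestry,
                      PySem.Set.update (PySem.Set.ofList [i]) visited, depth + 1))) := by
  unfold pvExpandA
  rw [pvFoldPair]
  simp

-- port of A: BFS with an explicit FIFO queue (queue.pop(0) = head, appends at the tail)
def pvALoop (m : PySem.Dict String (List String)) (md : Int)
    (queue : List (String × List String × PySem.Set String × Int)) : List (List String) :=
  match queue with
  | [] => []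
  | (current, ancestry, visited, depth) :: rest =>
    if depth ≥ md then pvALoop m md rest
    else
      let step := pvExpandA visited ancestry depth
        (PySem.List.sorted (m.getD current []) (fun x => x) false)
      step.1 ++ pvALoop m md (rest ++ step.2)
termination_by pvQM md (pvS m) queue
decreasing_by
  · simp only [pvQM, List.map_cons, List.sum_cons]
    have : 0 < (pvS m + 1) ^ ((md - depth).toNat) := Nat.pos_of_neZero _
    omega
  · rename_i hlt
    rw [pvExpandA_eq]
    simp only [pvQM, List.map_cons, List.sum_cons, List.map_append, List.sum_append,
      List.map_map, Function.comp_def]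
    have hk : ((PySem.List.sorted (m.getD current []) (fun x => x) false).filter
        (fun i => !PySem.Set.contains visited i)).length ≤ pvS m := by
      calc ((PySem.List.sorted (m.getD current []) (fun x => x) false).filter
            (fun i => !PySem.Set.contains visited i)).length
          ≤ (PySem.List.sorted (m.getD current []) (fun x => x) false).length :=
            List.length_filter_le _ _
        _ = (m.getD current []).length := PySem.List.length_sorted _ _ _
        _ ≤ pvS m := pvLenGetD m current
    have hr : (md - depth).toNat = (md - (depth + 1)).toNat + 1 := by omega
    have hp : 0 < (pvS m + 1) ^ ((md - (depth + 1)).toNat) := Nat.pos_of_neZero _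
    simp only [List.map_const', List.sum_replicate, smul_eq_mul]
    rw [hr, pow_succ]
    nlinarith [hk, hp]

def collect_initiator_ancestor_chains_uncached_py (file_url : String)
    (initiator_map : List (String × List String)) (max_depth : Int) : List (List String) :=
  PySem.List.sorted
    (pvALoop (PySem.Dict.mk initiator_map) max_depth
      [(file_url, [], PySem.Set.ofList [file_url], 0)])
    (fun c => c.length) true

-- ===== PORT B =====
-- port of B: recursive pre-order DFS (the nested `dfs` helper; its for-loop is pvDFSL)
mutual
def pvDFS (m : PySem.Dict String (List String)) (md : Int) (current : String)
    (ancestry : List String) (visited : PySem.Set String) (depth : Int) : List (List String) :=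
  if _h : depth ≥ md then []
  else pvDFSL m md (PySem.List.sorted (m.getD current []) (fun x => x) false)
         ancestry visited depth
termination_by ((md - depth).toNat, 0)
decreasing_by
  apply Prod.Lex.left
  omega

def pvDFSL (m : PySem.Dict String (List String)) (md : Int) (initiators : List String)
    (ancestry : List String) (visited : PySem.Set String) (depth : Int) : List (List String) :=
  match initiators with
  | [] => []
  | i :: rest =>
    if PySem.Set.contains visited i then pvDFSL m md rest ancestry visited depth
    else ((i :: ancestry) ::
            pvDFS m md i (i :: ancestry)
              (PySem.Set.update (PySem.Set.ofList [i]) visited) (depth + 1))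
         ++ pvDFSL m md rest ancestry visited depth
termination_by ((md - (depth + 1)).toNat, initiators.length)
decreasing_by
  · apply Prod.Lex.right
    simp only [List.length_cons]
    omega
  · apply Prod.Lex.right
    simp only [List.length_cons]
    omega
  · apply Prod.Lex.right
    simp only [List.length_cons]
    omega
end

def collect_initiator_ancestor_chains_uncached_py_alt (file_url : String)
    (initiator_map : List (String × List String)) (max_depth : Int) : List (List String) :=
  PySem.List.sorted
    (pvDFS (PySem.Dict.mk initiator_map) max_depth file_url []
      (PySem.Set.ofList [file_url]) 0)
    (fun c => c.length) true

-- ===== PRECONDITION & SPEC =====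
def Spec_collect_initiator_ancestor_chains_uncached_py (file_url : String) (initiator_map : List (String × List String)) (max_depth : Int) (out : List (List String)) : Prop := out = collect_initiator_ancestor_chains_uncached_py_alt file_url initiator_map max_depth
instance (file_url : String) (initiator_map : List (String × List String)) (max_depth : Int) (out : List (List String)) : Decidable (Spec_collect_initiator_ancestor_chains_uncached_py file_url initiator_map max_depth out) := by unfold Spec_collect_initiator_ancestor_chains_uncached_py; infer_instance

-- ===== CLAIM (what is proved, stated in full; the proofs are below) =====
def Claim_equal_collect_initiator_ancestor_chains_uncached_py : Prop := ∀ (file_url : String) (initiator_map : List (String × List String)) (max_depth : Int), Dom_collect_initiator_ancestor_chains_uncached_py file_url initiator_map max_depth → Spec_collect_initiator_ancestor_chains_uncached_py file_url initiator_map max_depth (collect_initiator_ancestor_chains_uncached_py file_url initiator_map max_depth)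

-- ===== LEMMAS AND PROOFS =====

-- ---------- the level-by-level normal form shared by both sides ----------

def pvUpd (vis : PySem.Set String) (i : String) : PySem.Set String :=
  PySem.Set.update (PySem.Set.ofList [i]) vis

def pvChildren (m : PySem.Dict String (List String)) (vis : PySem.Set String) (cur : String) :
    List String :=
  (PySem.List.sorted (m.getD cur []) (fun x => x) false).filter
    (fun i => !PySem.Set.contains vis i)

def pvFC (m : PySem.Dict String (List String)) (it : String × List String × PySem.Set String) :
    List (List String) :=
  (pvChildren m it.2.2 it.1).map (· :: it.2.1)

def pvFI (m : PySem.Dict String (List String)) (it : String × List String × PySem.Set String) :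
    List (String × List String × PySem.Set String) :=
  (pvChildren m it.2.2 it.1).map (fun i => (i, i :: it.2.1, pvUpd it.2.2 i))

-- canonical level-by-level chain list (proof device, used by neither port)
def pvBFSL (m : PySem.Dict String (List String)) (md : Int)
    (items : List (String × List String × PySem.Set String)) (depth : Int) : List (List String) :=
  if depth ≥ md then []
  else items.flatMap (pvFC m) ++ pvBFSL m md (items.flatMap (pvFI m)) (depth + 1)
termination_by (md - depth).toNat
decreasing_by omega

theorem pvBFSL_eq (m : PySem.Dict String (List String)) (md : Int)
    (items : List (String × List String × PySem.Set String)) (depth : Int) :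
    pvBFSL m md items depth
      = if depth ≥ md then []
        else items.flatMap (pvFC m) ++ pvBFSL m md (items.flatMap (pvFI m)) (depth + 1) := by
  rw [pvBFSL]

-- ---------- A's queue = the level normal form ----------

def pvEC (m : PySem.Dict String (List String)) (md : Int)
    (it : String × List String × PySem.Set String × Int) : List (List String) :=
  if it.2.2.2 ≥ md then [] else pvFC m (it.1, it.2.1, it.2.2.1)

def pvEI (m : PySem.Dict String (List String)) (md : Int)
    (it : String × List String × PySem.Set String × Int) :
    List (String × List String × PySem.Set String × Int) :=
  if it.2.2.2 ≥ md then []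
  else (pvFI m (it.1, it.2.1, it.2.2.1)).map (fun t => (t.1, t.2.1, t.2.2, it.2.2.2 + 1))

theorem pvALoop_cons (m : PySem.Dict String (List String)) (md : Int)
    (it : String × List String × PySem.Set String × Int) (rest : List _) :
    pvALoop m md (it :: rest) = pvEC m md it ++ pvALoop m md (rest ++ pvEI m md it) := by
  obtain ⟨current, ancestry, visited, depth⟩ := it
  by_cases h : depth ≥ md
  · rw [pvALoop]
    simp [h, pvEC, pvEI]
  · rw [pvALoop]
    simp only [h, ite_false]
    rw [pvExpandA_eq]
    simp [h, pvEC, pvEI, pvFC, pvFI, pvUpd, pvChildren, List.map_map, Function.comp_def]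

theorem pvALoop_append (m : PySem.Dict String (List String)) (md : Int)
    (a b : List (String × List String × PySem.Set String × Int)) :
    pvALoop m md (a ++ b)
      = a.flatMap (pvEC m md) ++ pvALoop m md (b ++ a.flatMap (pvEI m md)) := by
  induction a generalizing b with
  | nil => simp
  | cons x t ih =>
    rw [List.cons_append, pvALoop_cons, List.append_assoc, ih (b ++ pvEI m md x)]
    simp [List.append_assoc]

theorem pvALoop_level (m : PySem.Dict String (List String)) (md : Int)
    (q : List (String × List String × PySem.Set String × Int)) :
    pvALoop m md q = q.flatMap (pvEC m md) ++ pvALoop m md (q.flatMap (pvEI m md)) := by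
  have := pvALoop_append m md q []
  simpa using this

theorem pvBridge (m : PySem.Dict String (List String)) (md : Int) (r : Nat) :
    ∀ (frontier : List (String × List String × PySem.Set String)) (depth : Int),
      (md - depth).toNat = r →
      pvALoop m md (frontier.map (fun t => (t.1, t.2.1, t.2.2, depth)))
        = pvBFSL m md frontier depth := by
  induction r with
  | zero =>
    intro frontier depth hfuel
    have hge : depth ≥ md := by omega
    have hnil : ∀ (q : List (String × List String × PySem.Set String × Int)),
        (∀ it ∈ q, it.2.2.2 ≥ md) → pvALoop m md q = [] := by
      intro q hq
      induction q with
      | nil => rw [pvALoop]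
      | cons x t iht =>
        obtain ⟨c, a, v, d⟩ := x
        rw [pvALoop]
        have : d ≥ md := hq _ (List.mem_cons_self ..)
        simp only [this, ite_true]
        exact iht (fun it hit => hq it (List.mem_cons_of_mem _ hit))
    rw [hnil _ (by intro it hit; simp only [List.mem_map] at hit
                   obtain ⟨t, _, rfl⟩ := hit; exact hge)]
    rw [pvBFSL_eq]
    simp [hge]
  | succ r ih =>
    intro frontier depth hfuel
    have hlt : ¬ depth ≥ md := by omega
    have hr : (md - (depth + 1)).toNat = r := by omega
    rw [pvALoop_level]
    have hEC : (frontier.map (fun t => (t.1, t.2.1, t.2.2, depth))).flatMap (pvEC m md)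
        = frontier.flatMap (pvFC m) := by
      rw [List.flatMap_map]
      apply List.flatMap_congr
      intro t _
      simp [pvEC, hlt]
    have hEI : (frontier.map (fun t => (t.1, t.2.1, t.2.2, depth))).flatMap (pvEI m md)
        = (frontier.flatMap (pvFI m)).map (fun t => (t.1, t.2.1, t.2.2, depth + 1)) := by
      rw [List.flatMap_map, List.map_flatMap]
      apply List.flatMap_congr
      intro t _
      simp [pvEI, hlt]
    rw [hEC, hEI, ih _ _ hr]
    rw [pvBFSL_eq m md frontier depth]
    simp [hlt]

-- ---------- length invariants: every chain emitted below depth d is longer than d ----------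

theorem pvLenBFSL (m : PySem.Dict String (List String)) (md : Int) (r : Nat) :
    ∀ (items : List (String × List String × PySem.Set String)) (depth : Int),
      (md - depth).toNat = r → 0 ≤ depth →
      (∀ it ∈ items, it.2.1.length = depth.toNat) →
      ∀ c ∈ pvBFSL m md items depth, depth.toNat < c.length := by
  induction r with
  | zero =>
    intro items depth hfuel _ _ c hc
    rw [pvBFSL_eq] at hc
    have hge : depth ≥ md := by omega
    simp [hge] at hc
  | succ r ih =>
    intro items depth hfuel hd hlen c hc
    rw [pvBFSL_eq] at hc
    have hlt : ¬ depth ≥ md := by omega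
    simp only [hlt, ite_false, List.mem_append] at hc
    rcases hc with hc | hc
    · simp only [List.mem_flatMap, pvFC, List.mem_map] at hc
      obtain ⟨it, hit, i, -, rfl⟩ := hc
      simp [hlen it hit]
    · have := ih (items.flatMap (pvFI m)) (depth + 1) (by omega) (by omega)
        (by
          intro it hit
          simp only [List.mem_flatMap, pvFI, List.mem_map] at hit
          obtain ⟨jt, hjt, i, -, rfl⟩ := hit
          simp only [List.length_cons, hlen jt hjt]
          omega) c hc
      omega

theorem pvLenDFS (m : PySem.Dict String (List String)) (md : Int) (r : Nat) :
    ∀ (cur : String) (anc : List String) (vis : PySem.Set String) (depth : Int),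
      (md - depth).toNat = r → 0 ≤ depth → anc.length = depth.toNat →
      ∀ c ∈ pvDFS m md cur anc vis depth, depth.toNat < c.length := by
  induction r with
  | zero =>
    intro cur anc vis depth hfuel _ _ c hc
    rw [pvDFS] at hc
    have hge : depth ≥ md := by omega
    simp [hge] at hc
  | succ r ih =>
    intro cur anc vis depth hfuel hd hlen c hc
    rw [pvDFS] at hc
    have hlt : ¬ depth ≥ md := by omega
    rw [dif_neg hlt] at hc
    generalize (PySem.List.sorted (m.getD cur []) (fun x => x) false) = inits at hc
    induction inits with
    | nil => rw [pvDFSL] at hc; simp at hc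
    | cons i rest iht =>
      rw [pvDFSL] at hc
      by_cases hv : PySem.Set.contains vis i
      · rw [if_pos hv] at hc
        exact iht hc
      · rw [if_neg hv] at hc
        simp only [List.cons_append, List.mem_cons, List.mem_append] at hc
        rcases hc with rfl | hc | hc
        · simp [hlen]
        · have := ih i (i :: anc) (PySem.Set.update (PySem.Set.ofList [i]) vis) (depth + 1)
            (by omega) (by omega) (by simp only [List.length_cons, hlen]; omega) c hc
          omega
        · exact iht hc

-- ---------- the DFS list has the same length classes as the level normal form ----------

theorem pvDFSL_eq_flatMap (m : PySem.Dict String (List String)) (md : Int)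
    (inits : List String) (anc : List String) (vis : PySem.Set String) (depth : Int) :
    pvDFSL m md inits anc vis depth
      = (inits.filter (fun i => !PySem.Set.contains vis i)).flatMap
          (fun i => (i :: anc) :: pvDFS m md i (i :: anc) (pvUpd vis i) (depth + 1)) := by
  induction inits with
  | nil => rw [pvDFSL]; simp
  | cons i rest ih =>
    rw [pvDFSL]
    by_cases hv : PySem.Set.contains vis i
    · rw [if_pos hv, ih, List.filter_cons]
      rw [show (!PySem.Set.contains vis i) = false from by rw [hv]; rfl]
      simp
    · have hb : PySem.Set.contains vis i = false := by
        revert hv; cases PySem.Set.contains vis i <;> simp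
      rw [if_neg hv, ih, List.filter_cons]
      rw [show (!PySem.Set.contains vis i) = true from by rw [hb]; rfl]
      simp [pvUpd]

theorem pvBFSL_nil (m : PySem.Dict String (List String)) (md : Int) (r : Nat) :
    ∀ (depth : Int), (md - depth).toNat = r → pvBFSL m md [] depth = [] := by
  induction r with
  | zero =>
    intro depth hfuel
    rw [pvBFSL_eq]
    have hge : depth ≥ md := by omega
    simp [hge]
  | succ r ih =>
    intro depth hfuel
    rw [pvBFSL_eq]
    by_cases h : depth ≥ md
    · simp [h]
    · simp only [h, ite_false, List.flatMap_nil, List.nil_append]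
      exact ih (depth + 1) (by omega)

-- the filter of a whole level run decomposes item by item (for any fixed length class)
theorem pvBFSL_add (m : PySem.Dict String (List String)) (md : Int) (n : Nat) (r : Nat) :
    ∀ (xs ys : List (String × List String × PySem.Set String)) (depth : Int),
      (md - depth).toNat = r → 0 ≤ depth →
      (∀ it ∈ xs ++ ys, it.2.1.length = depth.toNat) →
      (pvBFSL m md (xs ++ ys) depth).filter (fun c => c.length == n)
        = (pvBFSL m md xs depth).filter (fun c => c.length == n)
          ++ (pvBFSL m md ys depth).filter (fun c => c.length == n) := by
  induction r with
  | zero =>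
    intro xs ys depth hfuel _ _
    have hge : depth ≥ md := by omega
    rw [pvBFSL_eq m md (xs ++ ys) depth, pvBFSL_eq m md xs depth, pvBFSL_eq m md ys depth]
    simp [hge]
  | succ r ih =>
    intro xs ys depth hfuel hd hlen
    have hlt : ¬ depth ≥ md := by omega
    rw [pvBFSL_eq m md (xs ++ ys) depth, pvBFSL_eq m md xs depth, pvBFSL_eq m md ys depth]
    simp only [hlt, ite_false, List.flatMap_append, List.filter_append]
    have hx : ∀ it ∈ xs, it.2.1.length = depth.toNat :=
      fun it h => hlen it (List.mem_append_left _ h)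
    have hy : ∀ it ∈ ys, it.2.1.length = depth.toNat :=
      fun it h => hlen it (List.mem_append_right _ h)
    have hnext : ∀ (zs : List (String × List String × PySem.Set String)),
        (∀ it ∈ zs, it.2.1.length = depth.toNat) →
        ∀ it ∈ zs.flatMap (pvFI m), it.2.1.length = (depth + 1).toNat := by
      intro zs hzs it hit
      simp only [List.mem_flatMap, pvFI, List.mem_map] at hit
      obtain ⟨jt, hjt, i, -, rfl⟩ := hit
      simp only [List.length_cons, hzs jt hjt]
      omega
    rw [ih (xs.flatMap (pvFI m)) (ys.flatMap (pvFI m)) (depth + 1) (by omega) (by omega)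
      (by
        intro it hit
        rw [← List.flatMap_append] at hit
        exact hnext (xs ++ ys) hlen it hit)]
    by_cases hn : n = depth.toNat + 1
    · have h3 : (pvBFSL m md (xs.flatMap (pvFI m)) (depth + 1)).filter
          (fun c => c.length == n) = [] := by
        rw [List.filter_eq_nil_iff]
        intro c hc
        have := pvLenBFSL m md ((md - (depth + 1)).toNat) (xs.flatMap (pvFI m)) (depth + 1)
          rfl (by omega) (hnext xs hx) c hc
        simp only [beq_iff_eq]
        omega
      rw [h3]
      simp
    · have h2 : (ys.flatMap (pvFC m)).filter (fun c => c.length == n) = [] := by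
        rw [List.filter_eq_nil_iff]
        intro c hc
        simp only [List.mem_flatMap, pvFC, List.mem_map] at hc
        obtain ⟨it, hit, i, -, rfl⟩ := hc
        simp only [beq_iff_eq, List.length_cons, hy it hit]
        omega
      rw [h2]
      simp

theorem pvBFSL_flat (m : PySem.Dict String (List String)) (md : Int) (n : Nat) :
    ∀ (its : List (String × List String × PySem.Set String)) (depth : Int), 0 ≤ depth →
      (∀ it ∈ its, it.2.1.length = depth.toNat) →
      (pvBFSL m md its depth).filter (fun c => c.length == n)
        = its.flatMap (fun it => (pvBFSL m md [it] depth).filter (fun c => c.length == n)) := by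
  intro its
  induction its with
  | nil =>
    intro depth _ _
    rw [pvBFSL_nil m md ((md - depth).toNat) depth rfl]
    simp
  | cons it its ih =>
    intro depth hd hlen
    have : it :: its = [it] ++ its := rfl
    rw [this, pvBFSL_add m md n ((md - depth).toNat) [it] its depth rfl hd hlen,
      ih depth hd (fun jt hj => hlen jt (List.mem_cons_of_mem _ hj))]
    simp

-- DFS from one frontier item has exactly the level normal form's length classes
theorem pvMain (m : PySem.Dict String (List String)) (md : Int) (n : Nat) (r : Nat) :
    ∀ (cur : String) (anc : List String) (vis : PySem.Set String) (depth : Int),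
      (md - depth).toNat = r → 0 ≤ depth → anc.length = depth.toNat →
      (pvDFS m md cur anc vis depth).filter (fun c => c.length == n)
        = (pvBFSL m md [(cur, anc, vis)] depth).filter (fun c => c.length == n) := by
  induction r with
  | zero =>
    intro cur anc vis depth hfuel _ _
    have hge : depth ≥ md := by omega
    rw [pvDFS, pvBFSL_eq]
    simp [hge]
  | succ r ih =>
    intro cur anc vis depth hfuel hd hlen
    have hlt : ¬ depth ≥ md := by omega
    rw [pvDFS, dif_neg hlt, pvDFSL_eq_flatMap, pvBFSL_eq]
    simp only [hlt, ite_false, List.flatMap_cons, List.flatMap_nil, List.append_nil]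
    rw [List.filter_append, List.filter_flatMap]
    simp only [pvFC, pvFI, pvChildren]
    generalize (PySem.List.sorted (m.getD cur []) (fun x => x) false).filter
        (fun i => !PySem.Set.contains vis i) = cs
    have hchild : ∀ i : String,
        ∀ c ∈ pvDFS m md i (i :: anc) (pvUpd vis i) (depth + 1), depth.toNat + 1 < c.length := by
      intro i c hc
      have := pvLenDFS m md ((md - (depth + 1)).toNat) i (i :: anc) (pvUpd vis i) (depth + 1)
        rfl (by omega) (by simp only [List.length_cons, hlen]; omega) c hc
      omega
    by_cases hn : n = depth.toNat + 1
    · have hL : cs.flatMap (fun i => List.filter (fun c => c.length == n)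
            ((i :: anc) :: pvDFS m md i (i :: anc) (pvUpd vis i) (depth + 1)))
          = cs.flatMap (fun i => [i :: anc]) := by
        apply List.flatMap_congr
        intro i _
        rw [List.filter_cons]
        have hkeep : ((i :: anc).length == n) = true := by simp [hlen, hn]
        rw [if_pos hkeep, List.filter_eq_nil_iff.mpr
          (fun c hc => by have := hchild i c hc; simp only [beq_iff_eq]; omega)]
      have hHeads : (cs.map (· :: anc)).filter (fun c => c.length == n) = cs.map (· :: anc) := by
        apply List.filter_eq_self.mpr
        intro c hc
        obtain ⟨i, -, rfl⟩ := List.mem_map.mp hc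
        simp [hlen, hn]
      have hB : (pvBFSL m md (cs.map (fun i => (i, i :: anc, pvUpd vis i))) (depth + 1)).filter
          (fun c => c.length == n) = [] := by
        rw [List.filter_eq_nil_iff]
        intro c hc
        have := pvLenBFSL m md ((md - (depth + 1)).toNat) _ (depth + 1) rfl (by omega)
          (by
            intro it hit
            obtain ⟨i, -, rfl⟩ := List.mem_map.mp hit
            simp only [List.length_cons, hlen]
            omega) c hc
        simp only [beq_iff_eq]
        omega
      rw [hL, hHeads, hB]
      simp only [List.append_nil]
      exact Eq.symm List.map_eq_flatMap
    · have hL : cs.flatMap (fun i => List.filter (fun c => c.length == n)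
            ((i :: anc) :: pvDFS m md i (i :: anc) (pvUpd vis i) (depth + 1)))
          = cs.flatMap (fun i =>
              (pvBFSL m md [(i, i :: anc, pvUpd vis i)] (depth + 1)).filter
                (fun c => c.length == n)) := by
        apply List.flatMap_congr
        intro i _
        rw [List.filter_cons]
        have hdrop : ¬ ((i :: anc).length == n) = true := by simp [hlen]; omega
        rw [if_neg hdrop]
        exact ih i (i :: anc) (pvUpd vis i) (depth + 1) (by omega) (by omega)
          (by simp only [List.length_cons, hlen]; omega)
      have hHeads : (cs.map (· :: anc)).filter (fun c => c.length == n) = [] := by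
        rw [List.filter_eq_nil_iff]
        intro c hc
        obtain ⟨i, -, rfl⟩ := List.mem_map.mp hc
        simp only [beq_iff_eq, List.length_cons, hlen]
        omega
      rw [hL, hHeads,
        pvBFSL_flat m md n (cs.map (fun i => (i, i :: anc, pvUpd vis i))) (depth + 1)
          (by omega)
          (by
            intro it hit
            obtain ⟨i, -, rfl⟩ := List.mem_map.mp hit
            simp only [List.length_cons, hlen]
            omega),
        List.flatMap_map]
      simp

-- ---------- a stable sort by key is determined by its key classes ----------

theorem pvSortedRevNil {α : Type} (key : α → Nat) :
    PySem.List.sorted ([] : List α) key true = [] := by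
  rw [PySem.List.sorted_rev_eq_foldl_insertBy]
  rfl

theorem pvSortedRevSnoc {α : Type} (key : α → Nat) (l : List α) (x : α) :
    PySem.List.sorted (l ++ [x]) key true
      = PySem.List.insertBy (fun a b => decide (key b < key a)) x
          (PySem.List.sorted l key true) := by
  rw [PySem.List.sorted_rev_eq_foldl_insertBy (l ++ [x]) key,
    PySem.List.sorted_rev_eq_foldl_insertBy l key, List.foldl_append]
  rfl

theorem pvFilterInsertBy {α : Type} (key : α → Nat) (k : Nat) (x : α) (ys : List α)
    (hys : ys.Pairwise (fun a b => key b ≤ key a)) :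
    (PySem.List.insertBy (fun a b => decide (key b < key a)) x ys).filter
        (fun y => key y == k)
      = if key x = k then ys.filter (fun y => key y == k) ++ [x]
        else ys.filter (fun y => key y == k) := by
  induction ys with
  | nil =>
    rw [PySem.List.insertBy]
    split_ifs with h <;> simp [h]
  | cons y ys ih =>
    rw [List.pairwise_cons] at hys
    obtain ⟨hy, hys'⟩ := hys
    rw [PySem.List.insertBy]
    by_cases hb : key y < key x
    · simp only [hb, decide_true, ite_true]
      by_cases hx : key x = k
      · have hempty : (y :: ys).filter (fun z => key z == k) = [] := by
          rw [List.filter_eq_nil_iff]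
          intro c hc
          rcases List.mem_cons.mp hc with rfl | hc
          · simp only [beq_iff_eq]; omega
          · have := hy c hc
            simp only [beq_iff_eq]; omega
        rw [List.filter_cons]
        simp only [hx, beq_self_eq_true, ite_true, hempty]
        simp
      · rw [List.filter_cons]
        have : ¬ (key x == k) = true := by simp [hx]
        rw [if_neg this]
        simp [hx]
    · simp only [hb, decide_false, Bool.false_eq_true, ite_false]
      rw [List.filter_cons, List.filter_cons, ih hys']
      by_cases hx : key x = k <;> by_cases hy2 : (key y == k) = true <;>
        simp [hx, hy2]
  
theorem pvFilterSortedRev {α : Type} [LinearOrder α] (key : α → Nat) (k : Nat) (xs : List α) :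
    (PySem.List.sorted xs key true).filter (fun y => key y == k)
      = xs.filter (fun y => key y == k) := by
  induction xs using List.reverseRecOn with
  | nil => rw [pvSortedRevNil]
  | append_singleton l x ih =>
    rw [pvSortedRevSnoc, pvFilterInsertBy key k x _ (PySem.List.sorted_pairwise_rev l key),
      List.filter_append, ih, List.filter_cons]
    split_ifs with h <;> simp_all

theorem pvPairwiseUnique {α : Type} (key : α → Nat) :
    ∀ (p q : List α), p.Pairwise (fun a b => key b ≤ key a) →
      q.Pairwise (fun a b => key b ≤ key a) →
      (∀ k, p.filter (fun y => key y == k) = q.filter (fun y => key y == k)) → p = q := by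
  intro p
  induction p with
  | nil =>
    intro q _ hq h
    cases q with
    | nil => rfl
    | cons b q' =>
      have := h (key b)
      simp at this
  | cons a p' ih =>
    intro q hp hq h
    cases q with
    | nil =>
      have := h (key a)
      simp at this
    | cons b q' =>
      rw [List.pairwise_cons] at hp hq
      obtain ⟨hpa, hp'⟩ := hp
      obtain ⟨hqb, hq'⟩ := hq
      have hmemq : key a ≤ key b := by
        have : (b :: q').filter (fun z => key z == key a) ≠ [] := by
          rw [← h (key a)]
          simp
        rw [ne_eq, List.filter_eq_nil_iff] at this
        push Not at this
        obtain ⟨z, hz, hkz⟩ := this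
        simp only [beq_iff_eq] at hkz
        rcases List.mem_cons.mp hz with rfl | hz
        · omega
        · have := hqb z hz; omega
      have hmemp : key b ≤ key a := by
        have : (a :: p').filter (fun z => key z == key b) ≠ [] := by
          rw [h (key b)]
          simp
        rw [ne_eq, List.filter_eq_nil_iff] at this
        push Not at this
        obtain ⟨z, hz, hkz⟩ := this
        simp only [beq_iff_eq] at hkz
        rcases List.mem_cons.mp hz with rfl | hz
        · omega
        · have := hpa z hz; omega
      have hab : key a = key b := by omega
      have hka := h (key a)
      rw [List.filter_cons, List.filter_cons] at hka
      have hbb : (key b == key a) = true := by simp [hab]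
      simp only [beq_self_eq_true, ite_true, hbb] at hka
      have hhead : a = b := (List.cons.injEq ..).mp hka |>.1
      have htail : p'.filter (fun y => key y == key a) = q'.filter (fun y => key y == key a) :=
        (List.cons.injEq ..).mp hka |>.2
      subst hhead
      have hrest : ∀ k, p'.filter (fun y => key y == k) = q'.filter (fun y => key y == k) := by
        intro k
        by_cases hk : k = key a
        · subst hk; exact htail
        · have hna : ¬ (key a == k) = true := by simp; omega
          have := h k
          rw [List.filter_cons, List.filter_cons, if_neg hna, if_neg hna] at this
          exact this
      rw [ih q' hp' hq' hrest]

-- ===== VERDICT (by name: the statement is the Claim_ definition above) =====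
theorem collect_initiator_ancestor_chains_uncached_py_spec : Claim_equal_collect_initiator_ancestor_chains_uncached_py := by
  intro file_url initiator_map max_depth _
  unfold Spec_collect_initiator_ancestor_chains_uncached_py
  unfold collect_initiator_ancestor_chains_uncached_py
    collect_initiator_ancestor_chains_uncached_py_alt
  apply pvPairwiseUnique (fun c => c.length) _ _
    (PySem.List.sorted_pairwise_rev _ _) (PySem.List.sorted_pairwise_rev _ _)
  intro k
  rw [pvFilterSortedRev, pvFilterSortedRev]
  have hA : pvALoop (PySem.Dict.mk initiator_map) max_depth
      [(file_url, [], PySem.Set.ofList [file_url], 0)]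
      = pvBFSL (PySem.Dict.mk initiator_map) max_depth
          [(file_url, [], PySem.Set.ofList [file_url])] 0 := by
    have := pvBridge (PySem.Dict.mk initiator_map) max_depth ((max_depth - 0).toNat)
      [(file_url, [], PySem.Set.ofList [file_url])] 0 rfl
    simpa using this
  rw [hA, ← pvMain (PySem.Dict.mk initiator_map) max_depth k ((max_depth - 0).toNat)
    file_url [] (PySem.Set.ofList [file_url]) 0 rfl (by omega) rfl]
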